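-- pv_equiv track=rewrite | github.com/anhvietta96/ba-thesis-smmseqs | src/Multisets/genmultisets.py | first_factors_new
-- ===== SOURCE A (Python) =====
-- def partialsum(l):
--   psums = [None] * len(l)
--   psums[0] = l[0]
--   for i in range(1,len(l)):
--     psums[i] = psums[i-1] + l[i]
--   return psums
--
-- def first_factors_new(k):
--   previous_sum = 0
--   sums = list()
--   for i in range(1,k):
--     previous_sum += i
--     sums.append(previous_sum)
--   sums.append(0)
--   sums = list(reversed(sums))
--   psums = partialsum(sums)
--   return psums
-- ===== SOURCE B (Python) =====
-- def first_factors_new(k):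
--     # closed form: entry m is Tet(k-1) - Tet(k-1-m), Tet(n) = n(n+1)(n+2)//6
--     if k < 2:
--         return [0]
--     n = k - 1
--     base = n * (n + 1) * (n + 2) // 6
--     return [base - (n - m) * (n - m + 1) * (n - m + 2) // 6 for m in range(k)]
-- ===== Notes on version B (the rewrite author's own statement) =====
-- stated objective: simpler
-- what changed: Replaced building triangular numbers, reversing the list and taking prefix sums of it with a direct closed-form formula output[m] = Tet(k-1) - Tet(k-1-m) using tetrahedral numbers.
import Mathlib
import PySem

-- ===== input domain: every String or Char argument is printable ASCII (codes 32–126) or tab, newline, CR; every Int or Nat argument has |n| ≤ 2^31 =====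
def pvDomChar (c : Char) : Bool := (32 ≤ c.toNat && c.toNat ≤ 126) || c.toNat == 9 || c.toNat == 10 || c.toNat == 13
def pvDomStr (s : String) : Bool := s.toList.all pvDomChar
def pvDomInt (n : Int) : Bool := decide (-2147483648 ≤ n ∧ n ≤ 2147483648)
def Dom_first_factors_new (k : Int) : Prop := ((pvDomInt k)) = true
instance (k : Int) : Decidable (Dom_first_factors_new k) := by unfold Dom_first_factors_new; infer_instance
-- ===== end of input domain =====

-- B replaces A's build–reverse–prefix-sum pipeline by the closed form
-- output[m] = Tet(k-1) - Tet(k-1-m) with tetrahedral numbers Tet(n) = n(n+1)(n+2)//6 (simpler; same cost).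

-- ===== PORT A =====
-- partialsum: psums[0] = l[0]; psums[i] = psums[i-1] + l[i]  (l is never empty when called from A)
def partialsum_port (l : List Int) : List Int :=
  match l with
  | [] => []  -- Python raises IndexError here; unreachable from first_factors_new
  | x :: _ =>
    (PySem.List.pyRange 1 (l.length : Int) 1).foldl
      (fun psums i => psums ++ [psums.getLast! + PySem.List.pyGetD l i 0]) [x]

def first_factors_new (k : Int) : List Int :=
  let st := (PySem.List.pyRange 1 k 1).foldl
      (fun (st : Int × List Int) i => (st.1 + i, st.2 ++ [st.1 + i])) (0, ([] : List Int))
  let sums := st.2 ++ [0]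
  let sums := sums.reverse
  partialsum_port sums

-- ===== PORT B =====
def tet_alt (n : Int) : Int := PySem.Int.floordiv (n * (n + 1) * (n + 2)) 6

def first_factors_new_alt (k : Int) : List Int :=
  if k < 2 then [0]
  else
    let n := k - 1
    let base := tet_alt n
    (PySem.List.pyRange 0 k 1).map (fun m => base - tet_alt (n - m))

-- ===== PRECONDITION & SPEC =====
def Spec_first_factors_new (k : Int) (out : List Int) : Prop := out = first_factors_new_alt k
instance (k : Int) (out : List Int) : Decidable (Spec_first_factors_new k out) := by unfold Spec_first_factors_new; infer_instance

-- ===== CLAIM (what is proved, stated in full; the proofs are below) =====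
def Claim_equal_first_factors_new : Prop := ∀ (k : Int), Dom_first_factors_new k → Spec_first_factors_new k (first_factors_new k)

-- ===== LEMMAS AND PROOFS =====

/-- Triangular numbers as a recurrence (value of A's `previous_sum` after step i). -/
def triS : Nat → Int
  | 0 => 0
  | i + 1 => triS i + ((i : Int) + 1)

/-- Tetrahedral numbers as a recurrence. -/
def tetS : Nat → Int
  | 0 => 0
  | n + 1 => tetS n + triS (n + 1)

theorem two_triS (n : Nat) : 2 * triS n = (n : Int) * ((n : Int) + 1) := by
  induction n with
  | zero => simp [triS]
  | succ n ih => simp only [triS]; push_cast; push_cast at ih; ring_nf; ring_nf at ih; omega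

theorem six_tetS (n : Nat) : 6 * tetS n = (n : Int) * ((n : Int) + 1) * ((n : Int) + 2) := by
  induction n with
  | zero => simp [tetS]
  | succ n ih =>
    simp only [tetS]
    have h := two_triS (n + 1)
    push_cast at h ⊢; push_cast at ih
    nlinarith [h, ih]

theorem tet_alt_eq (n : Nat) : tet_alt (n : Int) = tetS n := by
  unfold tet_alt
  rw [show (n : Int) * ((n : Int) + 1) * ((n : Int) + 2) = 6 * tetS n from (six_tetS n).symm]
  rw [PySem.Int.floordiv_eq_ediv_of_pos (by norm_num)]
  omega

/-- A's accumulation loop: after iterating i = 1 … n, previous_sum = triS n and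
    sums = [triS 1, …, triS n]. -/
theorem loopA (n : Nat) :
    (PySem.List.pyRange 1 ((n : Int) + 1) 1).foldl
      (fun (st : Int × List Int) i => (st.1 + i, st.2 ++ [st.1 + i])) (0, ([] : List Int))
    = (triS n, (List.range n).map (fun j => triS (j + 1))) := by
  induction n with
  | zero =>
    rw [show PySem.List.pyRange 1 (((0:Nat):Int) + 1) 1 = [] from
      PySem.List.pyRange_one_eq_nil (by norm_num)]
    simp [triS]
  | succ n ih =>
    rw [show ((n + 1 : Nat) : Int) + 1 = ((n : Int) + 1) + 1 by push_cast; ring,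
        PySem.List.pyRange_one_succ_right (show (1:Int) ≤ (n:Int)+1 by omega)]
    rw [List.foldl_append, ih]
    simp [List.range_succ, triS]

theorem rev_map_triS (n : Nat) :
    ((List.range n).map (fun j => triS (j + 1))).reverse
      = (List.range n).map (fun j => triS (n - j)) := by
  apply List.ext_getElem
  · simp
  · intro i h1 h2
    simp only [List.getElem_reverse, List.length_map, List.length_range,
      List.getElem_map, List.getElem_range]
    congr 1
    simp only [List.length_reverse, List.length_map, List.length_range] at h1
    omega

/-- The reversed list A feeds into partialsum. -/
def revList (n : Nat) : List Int := 0 :: (List.range n).map (fun j => triS (n - j))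

/-- Invariant of the partialsum loop on `revList n`. -/
theorem psum_loop (n m : Nat) (hm : m ≤ n) :
    (PySem.List.pyRange 1 ((m : Int) + 1) 1).foldl
      (fun psums i => psums ++ [psums.getLast! + PySem.List.pyGetD (revList n) i 0]) [0]
    = (List.range (m + 1)).map (fun i => tetS n - tetS (n - i)) := by
  induction m with
  | zero =>
    rw [show PySem.List.pyRange 1 (((0:Nat):Int) + 1) 1 = [] from
      PySem.List.pyRange_one_eq_nil (by norm_num)]
    simp
  | succ m ih =>
    have hm' : m ≤ n := Nat.le_of_succ_le hm
    rw [show ((m + 1 : Nat) : Int) + 1 = ((m : Int) + 1) + 1 by push_cast; ring,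
        PySem.List.pyRange_one_succ_right (show (1:Int) ≤ (m:Int)+1 by omega),
        List.foldl_append, ih hm']
    have hlast : ((List.range (m + 1)).map (fun i => tetS n - tetS (n - i))).getLast!
        = tetS n - tetS (n - m) := by
      rw [List.range_succ, List.map_append]
      simp
    have hget : PySem.List.pyGetD (revList n) ((m : Int) + 1) 0 = triS (n - m) := by
      rw [show (m : Int) + 1 = ((m + 1 : Nat) : Int) by push_cast; ring,
          PySem.List.pyGetD_natCast]
      simp only [revList, List.getD_cons_succ]
      have hlt : m < n := hm
      simp [List.getD, List.getElem?_map, List.getElem?_range hlt]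
    simp only [List.foldl_cons, List.foldl_nil, hlast, hget]
    rw [List.range_succ (n := m + 1), List.map_append]
    congr 1
    simp only [List.map_cons, List.map_nil, List.cons.injEq, and_true]
    obtain ⟨j, hj⟩ : ∃ j, n - m = j + 1 := ⟨n - m - 1, by omega⟩
    rw [show n - (m + 1) = j from by omega, hj,
        show tetS (j + 1) = tetS j + triS (j + 1) from rfl]
    ring

theorem partialsum_revList (n : Nat) :
    partialsum_port (revList n) = (List.range (n + 1)).map (fun i => tetS n - tetS (n - i)) := by
  rw [show revList n = 0 :: (List.range n).map (fun j => triS (n - j)) from rfl]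
  unfold partialsum_port
  rw [show (((0 : Int) :: (List.range n).map fun j => triS (n - j)).length : Int)
        = (n : Int) + 1 by simp]
  exact psum_loop n n le_rfl

theorem first_factors_new_eq_small (k : Int) (hk : k < 2) :
    first_factors_new k = [0] := by
  unfold first_factors_new
  rw [show PySem.List.pyRange 1 k 1 = [] from PySem.List.pyRange_one_eq_nil (by omega)]
  simp [partialsum_port, PySem.List.pyRange_one_eq_nil]

-- ===== VERDICT (by name: the statement is the Claim_ definition above) =====
theorem first_factors_new_spec : Claim_equal_first_factors_new := by
  intro k _
  unfold Spec_first_factors_new first_factors_new_alt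
  by_cases hk : k < 2
  · rw [if_pos hk, first_factors_new_eq_small k hk]
  · rw [if_neg hk]
    rw [not_lt] at hk
    obtain ⟨n, hn, rfl⟩ : ∃ n : Nat, 1 ≤ n ∧ k = (n : Int) + 1 :=
      ⟨(k - 1).toNat, by omega, by omega⟩
    unfold first_factors_new
    rw [loopA]
    simp only
    have hrev : ((List.range n).map (fun j => triS (j + 1)) ++ [(0 : Int)]).reverse
        = revList n := by
      rw [List.reverse_append, rev_map_triS]; rfl
    rw [hrev, partialsum_revList]
    rw [PySem.List.pyRange_one]
    rw [show ((n : Int) + 1 - 0).toNat = n + 1 by omega]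
    rw [List.map_map]
    apply List.map_congr_left
    intro m hm
    have hmlt : m < n + 1 := List.mem_range.mp hm
    have h1 : ((n : Int) + 1 - 1) = (n : Int) := by ring
    simp only [Function.comp_def, h1, zero_add]
    rw [show (n : Int) - (m : Int) = ((n - m : Nat) : Int) by omega]
    rw [tet_alt_eq, tet_alt_eq]
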